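-- pv_equiv track=rewrite | github.com/poclab-web/FpDoc2vec | result/doc2vec_tag_evaluation/MACCSkeys.py | create_index_mapping
-- ===== SOURCE A (Python) =====
-- from typing import Dict, List, Optional, Tuple, Union, Any, Callable, Mapping
--
-- def create_index_mapping(df_length: int, invalid_indices: List[int]) -> Dict[int, int]:
--     """
--     Create a mapping from original dataframe indices to filtered dataframe indices
--
--     Args:
--         df_length: Length of the original dataframe
--         invalid_indices: List of indices to exclude from the mapping
--
--     Returns:
--         Dictionary mapping original indices to new filtered indices
--     """
--     original_to_filtered = {}
--     filtered_idx = 0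
--
--     for orig_idx in range(df_length):
--         if orig_idx not in invalid_indices:
--             original_to_filtered[orig_idx] = filtered_idx
--             filtered_idx += 1
--
--     return original_to_filtered
-- ===== SOURCE B (Python) =====
-- from bisect import bisect_left
--
-- def create_index_mapping(df_length, invalid_indices):
--     bad = sorted({i for i in invalid_indices if 0 <= i < df_length})
--     bad_set = set(bad)
--     return {i: i - bisect_left(bad, i)
--             for i in range(df_length) if i not in bad_set}
-- ===== Notes on version B (the rewrite author's own statement) =====
-- stated objective: faster
-- what changed: Replaces A's per-index linear scan of invalid_indices plus a running counter by a sorted deduplicated set of in-range invalid indices with O(1) membership and a closed-form offset i - bisect_left(bad, i).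
import Mathlib
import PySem

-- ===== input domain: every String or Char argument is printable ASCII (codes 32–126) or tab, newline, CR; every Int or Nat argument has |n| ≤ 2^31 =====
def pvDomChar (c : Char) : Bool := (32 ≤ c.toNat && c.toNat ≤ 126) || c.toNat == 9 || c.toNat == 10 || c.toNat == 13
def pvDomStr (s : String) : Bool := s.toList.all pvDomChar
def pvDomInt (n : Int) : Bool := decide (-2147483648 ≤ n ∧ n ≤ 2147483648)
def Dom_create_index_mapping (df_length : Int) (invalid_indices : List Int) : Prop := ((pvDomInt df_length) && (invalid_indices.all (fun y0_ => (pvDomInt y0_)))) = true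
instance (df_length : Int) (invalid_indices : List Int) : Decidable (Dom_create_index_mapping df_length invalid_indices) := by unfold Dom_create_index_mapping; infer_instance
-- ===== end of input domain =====

-- B is faster: it sorts the deduplicated in-range invalid indices once and computes each
-- filtered position in closed form as i - bisect_left(bad, i), instead of A's running
-- counter with a linear scan of invalid_indices for every index.

-- ===== PORT A =====
def create_index_mapping (df_length : Int) (invalid_indices : List Int) : List (Int × Int) :=
  (((PySem.List.pyRange 0 df_length 1).foldl
      (fun (st : PySem.Dict Int Int × Int) orig_idx =>
        if invalid_indices.contains orig_idx then st
        else (st.1.insert orig_idx st.2, st.2 + 1))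
      (PySem.Dict.empty, 0)).1).items

-- ===== PORT B =====
-- bad = sorted({i for i in invalid_indices if 0 <= i < df_length})
def pvBad (df_length : Int) (invalid_indices : List Int) : List Int :=
  PySem.List.sorted
    (PySem.Set.ofList (invalid_indices.filter (fun i => decide (0 ≤ i) && decide (i < df_length))))
    (fun x => x)

def create_index_mapping_alt (df_length : Int) (invalid_indices : List Int) : List (Int × Int) :=
  let bad := pvBad df_length invalid_indices
  (PySem.List.pyRange 0 df_length 1).filterMap (fun i =>
    if bad.contains i then none
    else some (i, i - (PySem.List.bisectLeft bad i : Int)))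

-- ===== PRECONDITION & SPEC =====
def Spec_create_index_mapping (df_length : Int) (invalid_indices : List Int) (out : List (Int × Int)) : Prop := out = create_index_mapping_alt df_length invalid_indices
instance (df_length : Int) (invalid_indices : List Int) (out : List (Int × Int)) : Decidable (Spec_create_index_mapping df_length invalid_indices out) := by unfold Spec_create_index_mapping; infer_instance

-- ===== CLAIM (what is proved, stated in full; the proofs are below) =====
def Claim_equal_create_index_mapping : Prop := ∀ (df_length : Int) (invalid_indices : List Int), Dom_create_index_mapping df_length invalid_indices → Spec_create_index_mapping df_length invalid_indices (create_index_mapping df_length invalid_indices)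

-- ===== LEMMAS AND PROOFS =====

lemma pvBad_pairwise (df_length : Int) (invalid : List Int) :
    (pvBad df_length invalid).Pairwise (· < ·) := by
  exact PySem.List.sorted_ofList_pairwise_lt _

lemma pvBad_nodup (df_length : Int) (invalid : List Int) :
    (pvBad df_length invalid).Nodup :=
  (pvBad_pairwise df_length invalid).imp ne_of_lt

lemma mem_pvBad (df_length : Int) (invalid : List Int) (x : Int) :
    x ∈ pvBad df_length invalid ↔ x ∈ invalid ∧ 0 ≤ x ∧ x < df_length := by
  simp [pvBad, PySem.List.mem_sorted, PySem.Set.mem_ofList, List.mem_filter]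

-- counting "< k+1" over a duplicate-free list adds one exactly when k is present
lemma countP_lt_succ (l : List Int) (hl : l.Nodup) (k : Int) :
    l.countP (fun v => decide (v < k+1)) =
      l.countP (fun v => decide (v < k)) + (if k ∈ l then 1 else 0) := by
  induction l with
  | nil => simp
  | cons a t ih =>
    rcases List.nodup_cons.mp hl with ⟨ha, ht⟩
    simp only [List.countP_cons, List.mem_cons]
    rw [ih ht]
    by_cases hak : a = k
    · subst hak
      simp [ha]
    · have hka : ¬ k = a := fun h => hak h.symm
      by_cases hkt : k ∈ t <;> simp [hka, hkt] <;> split_ifs <;> omega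

-- bisect_left on a weakly sorted list counts the elements strictly below x
lemma bisectLeft_eq_countP (l : List Int) (hs : l.Pairwise (· ≤ ·)) (x : Int) :
    PySem.List.bisectLeft l x = l.countP (fun v => decide (v < x)) := by
  obtain ⟨hb, h1, h2⟩ := PySem.List.bisectLeft_spec l x hs
  set b := PySem.List.bisectLeft l x with hbdef
  have hsplit : l = l.take b ++ l.drop b := (List.take_append_drop b l).symm
  have htake : (l.take b).countP (fun v => decide (v < x)) = b := by
    have hall : ∀ y ∈ l.take b, (fun v => decide (v < x)) y = true := by
      intro y hy
      rcases List.mem_iff_getElem.mp hy with ⟨i, hi, rfl⟩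
      have hi' : i < b := by
        have := hi; simp [List.length_take] at this; omega
      have hil : i < l.length := lt_of_lt_of_le hi' hb
      have : l.take b = l.take b := rfl
      simp only [List.getElem_take]
      exact decide_eq_true (h1 i hil hi')
    rw [List.countP_eq_length.mpr hall, List.length_take]
    omega
  have hdrop : (l.drop b).countP (fun v => decide (v < x)) = 0 := by
    apply List.countP_eq_zero.mpr
    intro y hy
    rcases List.mem_iff_getElem.mp hy with ⟨i, hi, rfl⟩
    have hil : b + i < l.length := by
      have := hi; simp [List.length_drop] at this; omega
    simp only [List.getElem_drop]
    have := h2 (b + i) hil (Nat.le_add_right b i)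
    simpa using not_lt.mpr this
  have hcount : l.countP (fun v => decide (v < x)) = b := by
    conv_lhs => rw [hsplit]
    rw [List.countP_append, htake, hdrop]
    omega
  omega

-- every key produced by the first k iterations is < k
lemma fst_mem_Bpart (df_length : Int) (invalid : List Int) (k : Int)
    (p : Int × Int)
    (hp : p ∈ (PySem.List.pyRange 0 k 1).filterMap (fun i =>
      if (pvBad df_length invalid).contains i then none
      else some (i, i - (PySem.List.bisectLeft (pvBad df_length invalid) i : Int)))) :
    0 ≤ p.1 ∧ p.1 < k := by
  rcases List.mem_filterMap.mp hp with ⟨i, hi, hsome⟩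
  have hmem := PySem.List.mem_pyRange_one.mp hi
  split at hsome
  · exact absurd hsome (by simp)
  · cases Option.some.inj hsome
    simpa using hmem

-- loop invariant: after the first k iterations A's dict items are B's first k entries
-- and A's counter is k minus the number of invalid indices below k
lemma loopA (df_length : Int) (invalid : List Int) (k : Nat)
    (hk : (k : Int) ≤ df_length) :
    ((PySem.List.pyRange 0 (k : Int) 1).foldl
      (fun (st : PySem.Dict Int Int × Int) orig_idx =>
        if invalid.contains orig_idx then st
        else (st.1.insert orig_idx st.2, st.2 + 1))
      (PySem.Dict.empty, 0)).1.items =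
      (PySem.List.pyRange 0 (k : Int) 1).filterMap (fun i =>
        if (pvBad df_length invalid).contains i then none
        else some (i, i - (PySem.List.bisectLeft (pvBad df_length invalid) i : Int))) ∧
    ((PySem.List.pyRange 0 (k : Int) 1).foldl
      (fun (st : PySem.Dict Int Int × Int) orig_idx =>
        if invalid.contains orig_idx then st
        else (st.1.insert orig_idx st.2, st.2 + 1))
      (PySem.Dict.empty, 0)).2 =
      (k : Int) - (pvBad df_length invalid).countP (fun v => decide (v < (k : Int))) := by
  induction k with
  | zero =>
    simp only [Nat.cast_zero, PySem.List.pyRange_one_eq_nil (le_refl (0 : Int)),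
      List.foldl_nil, List.filterMap_nil]
    refine ⟨rfl, ?_⟩
    have h0 : (pvBad df_length invalid).countP (fun v => decide (v < (0 : Int))) = 0 := by
      apply List.countP_eq_zero.mpr
      intro a ha
      have := ((mem_pvBad df_length invalid a).mp ha).2.1
      simpa using not_lt.mpr this
    simp [h0]
  | succ k ih =>
    have hk' : (k : Int) ≤ df_length := by push_cast at hk; omega
    have hklt : (k : Int) < df_length := by push_cast at hk; omega
    obtain ⟨ih1, ih2⟩ := ih hk'
    have hr : PySem.List.pyRange 0 ((k + 1 : Nat) : Int) 1 =
        PySem.List.pyRange 0 (k : Int) 1 ++ [(k : Int)] := by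
      push_cast
      exact PySem.List.pyRange_one_succ_right (by positivity)
    rw [hr, List.foldl_append, List.filterMap_append]
    have hbadmem : (k : Int) ∈ pvBad df_length invalid ↔ (k : Int) ∈ invalid := by
      rw [mem_pvBad]
      constructor
      · rintro ⟨h, -, -⟩; exact h
      · intro h; exact ⟨h, by positivity, hklt⟩
    have hbadc : (pvBad df_length invalid).contains (k : Int) = invalid.contains (k : Int) := by
      rw [Bool.eq_iff_iff]
      simpa using hbadmem
    have hcnt := countP_lt_succ (pvBad df_length invalid) (pvBad_nodup df_length invalid) (k : Int)
    by_cases hc : invalid.contains (k : Int) = true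
    · -- k is invalid: A skips it, B filters it out
      have hkb : (k : Int) ∈ pvBad df_length invalid := hbadmem.mpr (by simpa using hc)
      have hbc : (pvBad df_length invalid).contains (k : Int) = true := by
        rw [hbadc]; exact hc
      constructor
      · simp only [List.foldl_cons, List.foldl_nil]
        rw [if_pos hc, ih1]
        simp only [List.filterMap_cons, List.filterMap_nil]
        rw [if_pos hbc]
        simp
      · simp only [List.foldl_cons, List.foldl_nil]
        rw [if_pos hc, ih2, show ((k + 1 : Nat) : Int) = (k : Int) + 1 by push_cast; ring,
          hcnt, if_pos hkb]
        push_cast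
        omega
    · -- k is valid: A appends (k, counter), B appends (k, k - bisect_left(bad, k))
      have hkb : (k : Int) ∉ pvBad df_length invalid := fun h => hc (by simpa using hbadmem.mp h)
      have hcf : invalid.contains (k : Int) = false := by simpa using hc
      have hbc : ¬ ((pvBad df_length invalid).contains (k : Int) = true) := by
        rw [hbadc]; exact hc
      have hFc : ((PySem.List.pyRange 0 (k : Int) 1).foldl
          (fun (st : PySem.Dict Int Int × Int) orig_idx =>
            if invalid.contains orig_idx then st
            else (st.1.insert orig_idx st.2, st.2 + 1))
          (PySem.Dict.empty, 0)).1.contains (k : Int) = false := by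
        rw [PySem.Dict.contains_eq_decide_mem_keys, decide_eq_false_iff_not]
        intro hmem
        have hmem' : (k : Int) ∈ (((PySem.List.pyRange 0 (k : Int) 1).foldl
            (fun (st : PySem.Dict Int Int × Int) orig_idx =>
              if invalid.contains orig_idx then st
              else (st.1.insert orig_idx st.2, st.2 + 1))
            (PySem.Dict.empty, 0)).1.items).map (·.1) := hmem
        rw [ih1] at hmem'
        rcases List.mem_map.mp hmem' with ⟨p, hp, hpk⟩
        have := fst_mem_Bpart df_length invalid (k : Int) p hp
        omega
      have hbis : ((PySem.List.bisectLeft (pvBad df_length invalid) (k : Int) : Nat) : Int) =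
          (((pvBad df_length invalid).countP (fun v => decide (v < (k : Int))) : Nat) : Int) :=
        congrArg (Nat.cast (R := Int))
          (bisectLeft_eq_countP (pvBad df_length invalid)
            ((pvBad_pairwise df_length invalid).imp le_of_lt) (k : Int))
      constructor
      · simp only [List.foldl_cons, List.foldl_nil]
        rw [if_neg hc]
        rw [PySem.Dict.items_insert_of_not_contains _ _ hFc, ih1, ih2]
        simp only [List.filterMap_cons, List.filterMap_nil]
        rw [if_neg hbc]
        simp [hbis]
      · simp only [List.foldl_cons, List.foldl_nil]
        rw [if_neg hc, ih2, show ((k + 1 : Nat) : Int) = (k : Int) + 1 by push_cast; ring,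
          hcnt, if_neg hkb]
        push_cast
        omega

-- ===== VERDICT (by name: the statement is the Claim_ definition above) =====
theorem create_index_mapping_spec : Claim_equal_create_index_mapping := by
  intro df_length invalid _
  unfold Spec_create_index_mapping
  simp only [create_index_mapping, create_index_mapping_alt]
  by_cases h : df_length ≤ 0
  · rw [PySem.List.pyRange_one_eq_nil h]
    simp [PySem.Dict.empty]
  · have h0 : 0 ≤ df_length := le_of_not_ge h
    have hdf : (df_length.toNat : Int) = df_length := Int.toNat_of_nonneg h0
    have hmain := (loopA df_length invalid df_length.toNat (le_of_eq hdf)).1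
    rw [hdf] at hmain
    exact hmain
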